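-- pv_equiv track=rewrite | github.com/DavidRiveraRvD/UVa-Online-Judge | BASICO/ARENAS/PRE-PARCIAL/W00028.py | evaluador
-- ===== SOURCE A (Python) =====
-- def evaluador(pal, new):
--     '''La funcion evaluador invierte la lista de la entrada
--     agregando cada elemento a una nueva lista'''
--     if len(pal)==1:
--         new.insert(0, pal[0])
--         return new
--     else:
--         new.insert(0, pal[0])
--         pal = pal[1:]
--         return evaluador(pal,new)
-- ===== SOURCE B (Python) =====
-- def evaluador(pal, new):
--     new[:0] = reversed(pal)
--     return new
-- ===== Notes on version B (the rewrite author's own statement) =====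
-- stated objective: faster
-- what changed: Replaces the element-by-element recursion (one insert(0,...) per call) with a single slice assignment that splices reversed(pal) in front of new in one O(n) step.
-- outside the precondition, e.g. on evaluador([], [1]): A raises IndexError, B returns [1]
import Mathlib
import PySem

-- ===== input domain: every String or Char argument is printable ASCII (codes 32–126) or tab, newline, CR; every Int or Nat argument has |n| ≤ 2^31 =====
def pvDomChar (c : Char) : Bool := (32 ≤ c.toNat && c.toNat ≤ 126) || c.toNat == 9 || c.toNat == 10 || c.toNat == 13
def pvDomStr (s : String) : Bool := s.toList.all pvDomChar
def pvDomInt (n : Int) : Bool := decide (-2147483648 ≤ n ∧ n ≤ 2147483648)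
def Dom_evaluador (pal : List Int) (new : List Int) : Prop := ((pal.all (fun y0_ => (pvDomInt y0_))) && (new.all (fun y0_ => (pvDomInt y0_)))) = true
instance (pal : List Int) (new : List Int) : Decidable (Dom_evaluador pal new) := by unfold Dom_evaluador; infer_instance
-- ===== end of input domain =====

-- B replaces A's per-element recursion with one slice splice (new[:0] = reversed(pal));
-- equivalence is about the RETURN value only (A mutates new in place, B splices into new in place too).

-- ===== PORT A =====
-- A recurses: insert pal[0] at the front of new, recurse on pal[1:], stopping when len(pal)==1.
-- On pal = [] Python raises IndexError (excluded by Pre_); the port returns new there only to be total.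
def evaluador (pal : List Int) (new : List Int) : List Int :=
  match pal with
  | [] => new
  | [x] => x :: new
  | x :: rest => evaluador rest (x :: new)

-- ===== PORT B =====
def evaluador_alt (pal : List Int) (new : List Int) : List Int :=
  pal.reverse ++ new

-- ===== PRECONDITION & SPEC =====
-- Pre_ excludes pal = [], where Python A raises IndexError (pal[0]).
def Pre_evaluador (pal : List Int) (new : List Int) : Prop := pal ≠ []
instance (pal : List Int) (new : List Int) : Decidable (Pre_evaluador pal new) := by unfold Pre_evaluador; infer_instance
def pvWitness_evaluador : List Int × List Int := ([3, 1, 2], [9, 8])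

def Spec_evaluador (pal : List Int) (new : List Int) (out : List Int) : Prop := out = evaluador_alt pal new
instance (pal : List Int) (new : List Int) (out : List Int) : Decidable (Spec_evaluador pal new out) := by unfold Spec_evaluador; infer_instance

-- ===== CLAIM (what is proved, stated in full; the proofs are below) =====
def Claim_equal_evaluador : Prop := ∀ (pal : List Int) (new : List Int), Dom_evaluador pal new → Pre_evaluador pal new → Spec_evaluador pal new (evaluador pal new)

-- ===== LEMMAS AND PROOFS =====
theorem evaluador_eq_reverse_append (pal : List Int) (new : List Int) (h : pal ≠ []) :
    evaluador pal new = pal.reverse ++ new := by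
  induction pal generalizing new with
  | nil => exact absurd rfl h
  | cons x rest ih =>
    cases rest with
    | nil => simp [evaluador]
    | cons y t =>
      have hih := ih (x :: new) (List.cons_ne_nil y t)
      simp only [evaluador, hih, List.reverse_cons]
      simp

-- ===== VERDICT (by name: the statement is the Claim_ definition above) =====
theorem evaluador_spec : Claim_equal_evaluador := by
  intro pal new _ hpre
  unfold Spec_evaluador evaluador_alt
  exact evaluador_eq_reverse_append pal new hpre
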